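-- pv_equiv track=rewrite | github.com/Koala15/coursematerial_2425 | 07-tuples/11-assignment-heatwave/student.py | heatwave
-- ===== SOURCE A (Python) =====
-- def heatwave(temperatures):
--     if len(temperatures) < 5:
--         return False
--
--     over_25 = 0
--     over_30 = 0
--     for temp in temperatures:
--         if temp >= 25:
--             over_25 +=1
--             if temp >=30:
--                 over_30 +=1
--         else:
--             over_25 = 0
--             over_30 = 0
--         if over_25 >=5 and over_30 >=3:
--             return True
--     return False
-- ===== SOURCE B (Python) =====
-- def heatwave(temperatures):
--     if len(temperatures) < 5:
--         return False
--     # segment the series into maximal runs of equal key (t >= 25), then test each warm run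
--     runs = []
--     n = len(temperatures)
--     i = 0
--     while i < n:
--         k = temperatures[i] >= 25
--         j = i + 1
--         while j < n and (temperatures[j] >= 25) == k:
--             j += 1
--         runs.append((k, temperatures[i:j]))
--         i = j
--     return any(k and len(run) >= 5 and sum(1 for t in run if t >= 30) >= 3
--                for k, run in runs)
-- ===== Notes on version B (the rewrite author's own statement) =====
-- stated objective: alternative
-- what changed: Replaces A's single accumulate-and-reset counter scan (with early return mid-run) by a segment-then-test traversal: the series is split into maximal runs of consecutive days with equal key (t >= 25), and each warm run is tested for length >= 5 and at least 3 days >= 30.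
import Mathlib
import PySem

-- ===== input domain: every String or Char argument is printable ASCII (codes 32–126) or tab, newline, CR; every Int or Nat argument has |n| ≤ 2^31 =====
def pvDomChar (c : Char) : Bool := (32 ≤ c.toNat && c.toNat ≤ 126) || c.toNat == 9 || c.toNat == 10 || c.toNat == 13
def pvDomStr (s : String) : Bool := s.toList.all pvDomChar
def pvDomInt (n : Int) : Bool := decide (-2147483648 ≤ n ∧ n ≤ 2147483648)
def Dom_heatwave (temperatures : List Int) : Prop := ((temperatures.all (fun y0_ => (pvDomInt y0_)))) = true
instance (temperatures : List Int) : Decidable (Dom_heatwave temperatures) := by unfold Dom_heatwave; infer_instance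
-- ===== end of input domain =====

-- B replaces A's accumulate-and-reset counter scan by a segment-then-test traversal
-- (split into maximal runs of equal key t ≥ 25, then test each warm run); objective: alternative.

-- ===== PORT A =====
-- literal port of A's loop: counters over_25/over_30, reset on a cool day, early True
def heatwaveLoop : List Int → Int → Int → Bool
  | [], _, _ => false
  | temp :: rest, over25, over30 =>
    let st : Int × Int :=
      if temp ≥ 25 then (over25 + 1, if temp ≥ 30 then over30 + 1 else over30)
      else (0, 0)
    if st.1 ≥ 5 ∧ st.2 ≥ 3 then true else heatwaveLoop rest st.1 st.2

def heatwave (temperatures : List Int) : Bool :=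
  if temperatures.length < 5 then false else heatwaveLoop temperatures 0 0

-- ===== PORT B =====
-- Source B's outer while loop: decompose the list into maximal runs of equal key (t ≥ 25)
def runGroups : List Int → List (Bool × List Int)
  | [] => []
  | t :: ts =>
    let k : Bool := decide (t ≥ 25)
    (k, t :: ts.takeWhile (fun x => decide (x ≥ 25) == k)) ::
      runGroups (ts.dropWhile (fun x => decide (x ≥ 25) == k))
  termination_by l => l.length
  decreasing_by
    exact Nat.lt_succ_of_le (List.length_dropWhile_le _ _)

-- Source B's final any(...) over the run list
def heatwave_alt (temperatures : List Int) : Bool :=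
  if temperatures.length < 5 then false
  else (runGroups temperatures).any (fun g =>
    g.1 && decide (5 ≤ g.2.length) && decide (3 ≤ g.2.countP (fun t => decide (t ≥ 30))))

-- ===== PRECONDITION & SPEC =====
def Spec_heatwave (temperatures : List Int) (out : Bool) : Prop := out = heatwave_alt temperatures
instance (temperatures : List Int) (out : Bool) : Decidable (Spec_heatwave temperatures out) := by unfold Spec_heatwave; infer_instance

-- ===== CLAIM (what is proved, stated in full; the proofs are below) =====
def Claim_equal_heatwave : Prop := ∀ (temperatures : List Int), Dom_heatwave temperatures → Spec_heatwave temperatures (heatwave temperatures)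

-- ===== LEMMAS AND PROOFS =====

-- cast arithmetic for one cons step of the ≥30 counter
theorem countP30_cons (t : Int) (w : List Int) :
    ((List.countP (fun t => decide (t ≥ 30)) (t :: w) : ℕ) : Int) =
      (if t ≥ 30 then 1 else 0) + ((List.countP (fun t => decide (t ≥ 30)) w : ℕ) : Int) := by
  rw [List.countP_cons]
  by_cases h : t ≥ 30
  · simp [h]
    omega
  · simp [h]

-- One warm run: the counter loop over a list equals "reach the thresholds by the end of
-- the warm prefix, else restart from the first cool day", provided the thresholds are not
-- yet met on entry.
theorem heatwaveLoop_run (ts : List Int) : ∀ (o25 o30 : Int), 0 ≤ o25 → 0 ≤ o30 →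
    ¬ (o25 ≥ 5 ∧ o30 ≥ 3) →
    heatwaveLoop ts o25 o30 =
      (if o25 + (ts.takeWhile (fun x => decide (x ≥ 25))).length ≥ 5 ∧
          o30 + ((ts.takeWhile (fun x => decide (x ≥ 25))).countP (fun t => decide (t ≥ 30))) ≥ 3
       then true
       else heatwaveLoop (ts.dropWhile (fun x => decide (x ≥ 25))) 0 0) := by
  induction ts with
  | nil =>
    intro o25 o30 _ _ hne
    simp [heatwaveLoop, hne]
  | cons t ts ih =>
    intro o25 o30 h25 h30 hne
    by_cases ht : t ≥ 25
    · rw [List.takeWhile_cons_of_pos (by simpa using ht),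
        List.dropWhile_cons_of_pos (by simpa using ht)]
      have hstep : (if t ≥ 30 then o30 + 1 else o30) = o30 + (if t ≥ 30 then 1 else 0) := by
        split <;> ring
      by_cases hdone : (o25 + 1 ≥ 5 ∧ (if t ≥ 30 then o30 + 1 else o30) ≥ 3)
      · have hL : heatwaveLoop (t :: ts) o25 o30 = true := by
          simp only [heatwaveLoop, ht, if_pos]
          simp [hdone]
        rw [hL]
        have h1 := hdone.1
        have h2 := hdone.2
        rw [hstep] at h2
        rw [if_pos]
        refine ⟨?_, ?_⟩
        · simp only [List.length_cons]; push_cast; omega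
        · rw [countP30_cons]
          have : (0:Int) ≤ ((List.countP (fun t => decide (t ≥ 30))
              (ts.takeWhile (fun x => decide (x ≥ 25))) : ℕ) : Int) := by positivity
          omega
      · have hL : heatwaveLoop (t :: ts) o25 o30 =
            heatwaveLoop ts (o25 + 1) (if t ≥ 30 then o30 + 1 else o30) := by
          simp only [heatwaveLoop, ht, if_pos]
          simp [hdone]
        rw [hL, ih (o25 + 1) (if t ≥ 30 then o30 + 1 else o30) (by omega)
          (by split <;> omega) hdone]
        refine if_congr ?_ rfl rfl
        rw [countP30_cons, hstep]
        simp only [List.length_cons]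
        push_cast
        constructor <;> (rintro ⟨ha, hb⟩; exact ⟨by omega, by omega⟩)
    · rw [List.takeWhile_cons_of_neg (by simpa using ht),
        List.dropWhile_cons_of_neg (by simpa using ht)]
      have hL : heatwaveLoop (t :: ts) o25 o30 = heatwaveLoop ts 0 0 := by
        simp only [heatwaveLoop, ht]
        norm_num
      have hL0 : heatwaveLoop (t :: ts) 0 0 = heatwaveLoop ts 0 0 := by
        simp only [heatwaveLoop, ht]
        norm_num
      rw [hL, if_neg (by simpa using hne), hL0]

-- Skipping a cool prefix: the loop ignores days < 25 when the counters are at zero.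
theorem heatwaveLoop_skip (p : List Int) (rest : List Int)
    (hp : ∀ x ∈ p, ¬ (x ≥ 25)) :
    heatwaveLoop (p ++ rest) 0 0 = heatwaveLoop rest 0 0 := by
  induction p with
  | nil => rfl
  | cons t p ih =>
    have ht : ¬ (t ≥ 25) := hp t (List.mem_cons_self ..)
    have h1 : heatwaveLoop (t :: (p ++ rest)) 0 0 = heatwaveLoop (p ++ rest) 0 0 := by
      simp only [heatwaveLoop, ht]
      norm_num
    rw [List.cons_append, h1, ih (fun x hx => hp x (List.mem_cons_of_mem _ hx))]

-- Main bridge: A's counter loop started at zero equals B's any-over-runs.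
theorem heatwaveLoop_eq_runs (n : ℕ) : ∀ (ts : List Int), ts.length ≤ n →
    heatwaveLoop ts 0 0 = (runGroups ts).any (fun g =>
      g.1 && decide (5 ≤ g.2.length) && decide (3 ≤ g.2.countP (fun t => decide (t ≥ 30)))) := by
  induction n with
  | zero =>
    intro ts hts
    rw [List.length_eq_zero_iff.mp (Nat.le_zero.mp hts)]
    simp [heatwaveLoop, runGroups]
  | succ n ih =>
    intro ts hts
    match ts with
    | [] => simp [heatwaveLoop, runGroups]
    | t :: ts =>
      by_cases ht : t ≥ 25
      · have hk : (decide (t ≥ 25)) = true := by simpa using ht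
        have e1 : List.takeWhile (fun x => decide (x ≥ 25) == true) ts =
            List.takeWhile (fun x => decide (x ≥ 25)) ts := by
          congr 1; funext x; simp
        have e2 : List.dropWhile (fun x => decide (x ≥ 25) == true) ts =
            List.dropWhile (fun x => decide (x ≥ 25)) ts := by
          congr 1; funext x; simp
        rw [runGroups]
        simp only [hk]
        rw [e1, e2, List.any_cons]
        rw [heatwaveLoop_run (t :: ts) 0 0 le_rfl le_rfl (by omega)]
        rw [List.takeWhile_cons_of_pos (by simpa using ht),
          List.dropWhile_cons_of_pos (by simpa using ht)]
        rw [ih (ts.dropWhile (fun x => decide (x ≥ 25)))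
          (le_trans (List.length_dropWhile_le _ _) (Nat.lt_succ_iff.mp (by simpa using hts)))]
        by_cases hgood : (5 ≤ (t :: ts.takeWhile (fun x => decide (x ≥ 25))).length ∧
            3 ≤ (t :: ts.takeWhile (fun x => decide (x ≥ 25))).countP (fun t => decide (t ≥ 30)))
        · rw [if_pos]
          · have hd2 := decide_eq_true hgood.2
            simp [hd2]
            left
            have h1 := hgood.1
            simp at h1
            omega
          · have h1 := hgood.1
            have h2 := hgood.2
            refine ⟨?_, ?_⟩
            · simp only [List.length_cons] at h1 ⊢; push_cast; omega
            · have := countP30_cons t (ts.takeWhile (fun x => decide (x ≥ 25)))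
              by_cases h30t : t ≥ 30 <;> simp only [h30t, if_pos, ite_false] at this <;> omega
        · rw [if_neg]
          · rcases Decidable.not_and_iff_not_or_not.mp hgood with h | h
            · simp
              intro ha hb
              exfalso
              simp at h
              omega
            · simp [decide_eq_false h]
          · intro hc
            apply hgood
            have h1 := hc.1
            have h2 := hc.2
            refine ⟨?_, ?_⟩
            · simp only [List.length_cons] at h1 ⊢; omega
            · have := countP30_cons t (ts.takeWhile (fun x => decide (x ≥ 25)))
              by_cases h30t : t ≥ 30 <;> simp only [h30t, if_pos, ite_false] at this <;> omega
      · have hk : (decide (t ≥ 25)) = false := by simpa using ht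
        have hL : heatwaveLoop (t :: ts) 0 0 = heatwaveLoop ts 0 0 := by
          simp only [heatwaveLoop, ht]
          norm_num
        rw [runGroups]
        simp only [hk]
        rw [List.any_cons]
        have hskip : heatwaveLoop ts 0 0 =
            heatwaveLoop (ts.dropWhile (fun x => decide (x ≥ 25) == false)) 0 0 := by
          conv_lhs => rw [← List.takeWhile_append_dropWhile
            (p := fun x => decide (x ≥ 25) == false) (l := ts)]
          exact heatwaveLoop_skip _ _ (fun x hx => by
            have := List.mem_takeWhile_imp hx
            simpa using this)
        rw [hL, hskip,
          ih (ts.dropWhile (fun x => decide (x ≥ 25) == false))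
            (le_trans (List.length_dropWhile_le _ _) (Nat.lt_succ_iff.mp (by simpa using hts)))]
        simp

-- ===== VERDICT (by name: the statement is the Claim_ definition above) =====
theorem heatwave_spec : Claim_equal_heatwave := by
  intro ts _
  unfold Spec_heatwave heatwave heatwave_alt
  split
  · rfl
  · exact heatwaveLoop_eq_runs ts.length ts le_rfl
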